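-- pv_equiv track=rewrite | github.com/halder/algorithms | graphs/depth_first_search.py | dfs
-- ===== SOURCE A (Python) =====
-- def dfs(graph, s=0):
--     discovered = [s]
--
--     if s in graph:
--         for neighbor in graph[s][::-1]:
--             if neighbor not in discovered:
--                 unseen = [d for d in dfs(graph, neighbor) if d not in discovered]
--                 discovered.extend(unseen)
--
--     return discovered
-- ===== SOURCE B (Python) =====
-- def dfs(graph, s=0):
--     # Iterative DFS with an explicit stack and one shared visited list;
--     # each node is expanded at most once (A re-runs dfs per neighbor and filters).
--     order = []
--     stack = [s]
--     while stack:
--         v = stack.pop()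
--         if v not in order:
--             order.append(v)
--             if v in graph:
--                 stack.extend(graph[v])
--     return order
-- ===== Notes on version B (the rewrite author's own statement) =====
-- stated objective: alternative
-- what changed: B replaces A's recursive recompute-subtree-and-filter traversal by an iterative DFS with an explicit stack and one shared visited list, expanding each node at most once.
import Mathlib
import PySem

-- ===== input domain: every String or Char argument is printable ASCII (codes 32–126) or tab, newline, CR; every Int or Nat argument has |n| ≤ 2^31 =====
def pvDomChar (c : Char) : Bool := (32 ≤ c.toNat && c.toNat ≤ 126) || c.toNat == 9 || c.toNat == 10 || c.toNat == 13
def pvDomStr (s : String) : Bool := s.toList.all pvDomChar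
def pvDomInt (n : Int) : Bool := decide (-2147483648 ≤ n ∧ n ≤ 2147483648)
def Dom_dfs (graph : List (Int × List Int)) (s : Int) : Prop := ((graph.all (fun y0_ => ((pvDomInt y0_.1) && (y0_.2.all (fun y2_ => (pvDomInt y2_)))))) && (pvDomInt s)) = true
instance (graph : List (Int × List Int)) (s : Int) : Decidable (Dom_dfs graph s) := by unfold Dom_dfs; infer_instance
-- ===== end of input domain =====

-- B replaces A's recursive recompute-the-subtree-and-filter traversal by an
-- iterative DFS with an explicit stack and one shared visited list (objective: alternative).

-- first-match association-list lookup: exact port of Python's 'graph[s]' / 's in graph'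
def pvLookup : List (Int × List Int) → Int → Option (List Int)
  | [], _ => none
  | (k, v) :: rest, s => if k = s then some v else pvLookup rest s

-- ===== PORT A =====
-- fueled transliteration of A's recursion; fuel graph.length+1 never runs out on
-- inputs where the Python terminates (call chains visit distinct keys)
def dfsA_F : Nat → List (Int × List Int) → Int → List Int
  | 0, _, s => [s]
  | f+1, g, s =>
      match pvLookup g s with
      | none => [s]
      | some ns =>
          ns.reverse.foldl
            (fun disc nb =>
              if nb ∈ disc then disc
              else disc ++ (dfsA_F f g nb).filter (fun d => d ∉ disc))
            [s]

def dfs (graph : List (Int × List Int)) (s : Int) : List Int :=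
  dfsA_F (graph.length + 1) graph s

-- ===== PORT B =====
-- number of graph keys not yet visited: termination measure of Source B's while loop
def pvKeyRem (g : List (Int × List Int)) (seen : List Int) : Nat :=
  ((g.map Prod.fst).filter (fun k => k ∉ seen)).length

theorem pvFilt_le (l seen : List Int) (v : Int) :
    (l.filter (fun k => k ∉ seen ++ [v])).length ≤ (l.filter (fun k => k ∉ seen)).length := by
  induction l with
  | nil => simp
  | cons a l ih =>
      rw [List.filter_cons, List.filter_cons]
      simp only [decide_eq_true_eq]
      by_cases h1 : a ∈ seen ++ [v] <;> by_cases h2 : a ∈ seen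
      · rw [if_neg (not_not_intro h1), if_neg (not_not_intro h2)]; exact ih
      · rw [if_neg (not_not_intro h1), if_pos h2, List.length_cons]
        exact Nat.le_succ_of_le ih
      · exact absurd (List.mem_append_left _ h2) h1
      · rw [if_pos h1, if_pos h2, List.length_cons, List.length_cons]
        exact Nat.succ_le_succ ih

theorem pvFilt_lt : ∀ (l seen : List Int) (v : Int), v ∈ l → v ∉ seen →
    (l.filter (fun k => k ∉ seen ++ [v])).length < (l.filter (fun k => k ∉ seen)).length := by
  intro l
  induction l with
  | nil => intro seen v h; cases h
  | cons a l ih =>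
      intro seen v hv hvs
      rw [List.filter_cons, List.filter_cons]
      simp only [decide_eq_true_eq]
      by_cases hav : a = v
      · subst hav
        have h1 : a ∈ seen ++ [a] := List.mem_append_right _ (List.mem_singleton.2 rfl)
        rw [if_neg (not_not_intro h1), if_pos hvs, List.length_cons]
        exact Nat.lt_succ_of_le (pvFilt_le l seen a)
      · have hv' : v ∈ l := by
          rcases List.mem_cons.1 hv with h | h
          · exact absurd h.symm hav
          · exact h
        have h := ih seen v hv' hvs
        by_cases h2 : a ∈ seen
        · have h1 : a ∈ seen ++ [v] := List.mem_append_left _ h2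
          rw [if_neg (not_not_intro h1), if_neg (not_not_intro h2)]
          exact h
        · have h1 : a ∉ seen ++ [v] := by
            simp only [List.mem_append, List.mem_singleton]
            rintro (hx | hx)
            · exact h2 hx
            · exact hav hx
          rw [if_pos h1, if_pos h2, List.length_cons, List.length_cons]
          exact Nat.succ_lt_succ h

theorem pvKeyRem_lt {g : List (Int × List Int)} {seen : List Int} {v : Int}
    (hk : v ∈ g.map Prod.fst) (hv : v ∉ seen) :
    pvKeyRem g (seen ++ [v]) < pvKeyRem g seen :=
  pvFilt_lt (g.map Prod.fst) seen v hk hv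

theorem pvKeyRem_eq {g : List (Int × List Int)} {seen : List Int} {v : Int}
    (hk : v ∉ g.map Prod.fst) :
    pvKeyRem g (seen ++ [v]) = pvKeyRem g seen := by
  unfold pvKeyRem
  congr 1
  apply List.filter_congr
  intro k hkmem
  have hne : k ≠ v := fun h => hk (h ▸ hkmem)
  simp [List.mem_append, hne]

theorem pvLookup_eq_none_iff (g : List (Int × List Int)) (s : Int) :
    pvLookup g s = none ↔ s ∉ g.map Prod.fst := by
  induction g with
  | nil => simp [pvLookup]
  | cons p rest ih =>
      obtain ⟨k, v⟩ := p
      by_cases h : k = s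
      · subst h; simp [pvLookup]
      · simp [pvLookup, h, ih, Ne.symm h]

-- Source B's while loop: pop the top of the stack, record it on first visit and push its
-- neighbours. The Lean stack list keeps the TOP at the HEAD (Python's stack.pop()
-- takes the last element), so Python's stack.extend(graph[v]) — whose elements are
-- then popped last-pushed-first, i.e. in reversed order — becomes ns.reverse ++ st.
def runS (g : List (Int × List Int)) : List Int → List Int → List Int
  | seen, [] => seen
  | seen, v :: st =>
      if hv : v ∈ seen then runS g seen st
      else runS g (seen ++ [v])
        ((match pvLookup g v with | none => [] | some ns => ns.reverse) ++ st)
termination_by seen st => (pvKeyRem g seen, st.length)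
decreasing_by
  · rw [Prod.lex_def]
    exact Or.inr ⟨rfl, Nat.lt_succ_self _⟩
  · rw [Prod.lex_def]
    cases hl : pvLookup g v with
    | none =>
        have hk : v ∉ g.map Prod.fst := (pvLookup_eq_none_iff g v).1 hl
        exact Or.inr ⟨pvKeyRem_eq hk, by simp [hl]⟩
    | some ns =>
        have hk : v ∈ g.map Prod.fst := by
          by_contra h
          rw [← pvLookup_eq_none_iff] at h
          rw [h] at hl; cases hl
        exact Or.inl (pvKeyRem_lt hk hv)

def dfs_alt (graph : List (Int × List Int)) (s : Int) : List Int :=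
  runS graph [] [s]

-- ===== PRECONDITION & SPEC =====
-- neighbours of v (Python: graph[v] if v in graph else []), first matching key
def pvNbrsD (g : List (Int × List Int)) (v : Int) : List Int :=
  ((g.find? (fun p => p.1 == v)).map Prod.snd).getD []
-- one closure step: add all neighbours of members
def pvGrow (g : List (Int × List Int)) (vs : List Int) : List Int :=
  (vs ++ vs.flatMap (pvNbrsD g)).dedup
-- all nodes reachable from v in ≥ 1 step (enough iterations to reach the fixpoint)
def pvDesc (g : List (Int × List Int)) (v : Int) : List Int :=
  (pvGrow g)^[(g.flatMap (fun p => p.2)).dedup.length + 1] (pvNbrsD g v)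

-- Pre_ excludes exactly the inputs on which A's recursion never terminates
-- (Python raises RecursionError): graphs with a cycle of length ≥ 2 reachable from s.
def Pre_dfs (graph : List (Int × List Int)) (s : Int) : Prop :=
  ∀ v ∈ (s :: pvDesc graph s), ∀ w ∈ pvNbrsD graph v, w ≠ v → v ∉ (w :: pvDesc graph w)
instance (graph : List (Int × List Int)) (s : Int) : Decidable (Pre_dfs graph s) := by
  unfold Pre_dfs; infer_instance

def pvWitness_dfs : (List (Int × List Int)) × Int := ([(0, [1, 2]), (1, [2])], 0)

def Spec_dfs (graph : List (Int × List Int)) (s : Int) (out : List Int) : Prop := out = dfs_alt graph s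
instance (graph : List (Int × List Int)) (s : Int) (out : List Int) : Decidable (Spec_dfs graph s out) := by unfold Spec_dfs; infer_instance

-- ===== CLAIM (what is proved, stated in full; the proofs are below) =====
def Claim_equal_dfs : Prop := ∀ (graph : List (Int × List Int)) (s : Int), Dom_dfs graph s → Pre_dfs graph s → Spec_dfs graph s (dfs graph s)

-- ===== LEMMAS AND PROOFS =====

-- edge relation and reachability
def EdgeG (g : List (Int × List Int)) (u v : Int) : Prop := v ∈ pvNbrsD g u

-- A's loop body, named for the proofs (definitionally the port's lambda)
def stepA (f : Nat) (g : List (Int × List Int)) : List Int → Int → List Int :=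
  fun disc nb => if nb ∈ disc then disc else disc ++ (dfsA_F f g nb).filter (fun d => d ∉ disc)

-- acyclicity (no cycle of length ≥ 2) among nodes reachable from s
def AcyG (g : List (Int × List Int)) (s : Int) : Prop :=
  ∀ u w, Relation.ReflTransGen (EdgeG g) s u → EdgeG g u w → Relation.ReflTransGen (EdgeG g) w u → w = u

-- number of keys reachable from s (fuel measure)
def mKset (g : List (Int × List Int)) (s : Int) : Set Int :=
  {v | Relation.ReflTransGen (EdgeG g) s v ∧ v ∈ g.map Prod.fst}
noncomputable def mK (g : List (Int × List Int)) (s : Int) : Nat := (mKset g s).ncard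

theorem dfsA_F_succ (f : Nat) (g : List (Int × List Int)) (s : Int) :
    dfsA_F (f+1) g s = match pvLookup g s with
      | none => [s]
      | some ns => ns.reverse.foldl (stepA f g) [s] := rfl

theorem runS_nil (g : List (Int × List Int)) (seen : List Int) : runS g seen [] = seen := by
  rw [runS]

theorem runS_cons (g : List (Int × List Int)) (seen : List Int) (v : Int) (st : List Int) :
    runS g seen (v :: st) =
      if v ∈ seen then runS g seen st
      else runS g (seen ++ [v])
        ((match pvLookup g v with | none => [] | some ns => ns.reverse) ++ st) := by
  rw [runS]
  split_ifs <;> rfl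

theorem pvNbrsD_eq (g : List (Int × List Int)) (v : Int) :
    pvNbrsD g v = (pvLookup g v).getD [] := by
  unfold pvNbrsD
  induction g with
  | nil => rfl
  | cons p rest ih =>
      obtain ⟨k, w⟩ := p
      by_cases h : k = v
      · subst h; simp [pvLookup]
      · simp [pvLookup, h, ih]

theorem mem_nbrs_mem_flat {g : List (Int × List Int)} {x y : Int}
    (h : y ∈ pvNbrsD g x) : y ∈ g.flatMap (fun p => p.2) := by
  rw [pvNbrsD_eq] at h
  induction g with
  | nil => simp [pvLookup] at h
  | cons p rest ih =>
      obtain ⟨k, v⟩ := p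
      by_cases hk : k = x
      · simp [pvLookup, hk] at h
        simp
        exact Or.inl h
      · simp [pvLookup, hk] at h
        have := ih h
        simp only [List.flatMap_cons, List.mem_append]
        exact Or.inr this

-- head decomposition of reachability, dropping leading self-loops
theorem headDecomp {g : List (Int × List Int)} {s d : Int}
    (h : Relation.ReflTransGen (EdgeG g) s d) :
    d = s ∨ ∃ q, EdgeG g s q ∧ q ≠ s ∧ Relation.ReflTransGen (EdgeG g) q d := by
  induction h with
  | refl => exact Or.inl rfl
  | @tail b c hb e ih =>
      rcases ih with rfl | ⟨q, hq, hqs, hr⟩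
      · by_cases hc : c = b
        · exact Or.inl hc
        · exact Or.inr ⟨c, e, hc, Relation.ReflTransGen.refl⟩
      · exact Or.inr ⟨q, hq, hqs, hr.tail e⟩

-- closure-iteration facts
theorem subset_grow (g : List (Int × List Int)) (X : List Int) : X ⊆ pvGrow g X := by
  intro a ha; unfold pvGrow; rw [List.mem_dedup]; exact List.mem_append_left _ ha

theorem nbrs_subset_grow {g : List (Int × List Int)} {X : List Int} {x : Int} (hx : x ∈ X) :
    pvNbrsD g x ⊆ pvGrow g X := by
  intro a ha; unfold pvGrow; rw [List.mem_dedup]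
  exact List.mem_append_right _ (List.mem_flatMap.2 ⟨x, hx, ha⟩)

theorem grow_subset_univ {g : List (Int × List Int)} {X : List Int}
    (h : X ⊆ g.flatMap (fun p => p.2)) : pvGrow g X ⊆ g.flatMap (fun p => p.2) := by
  intro a ha; unfold pvGrow at ha; rw [List.mem_dedup] at ha
  rcases List.mem_append.1 ha with h1 | h1
  · exact h h1
  · rcases List.mem_flatMap.1 h1 with ⟨x, _, hax⟩
    exact mem_nbrs_mem_flat hax

theorem subset_iterate (g : List (Int × List Int)) (m : Nat) (X : List Int) :
    X ⊆ (pvGrow g)^[m] X := by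
  induction m with
  | zero => simp
  | succ m ih =>
      rw [Function.iterate_succ_apply']
      exact fun a ha => subset_grow g _ (ih ha)

theorem iterate_subset_iterate (g : List (Int × List Int)) {i j : Nat} (h : i ≤ j) (X : List Int) :
    (pvGrow g)^[i] X ⊆ (pvGrow g)^[j] X := by
  have : j = (j - i) + i := by omega
  rw [this, Function.iterate_add_apply]
  exact subset_iterate g _ _

theorem iterate_subset_univ {g : List (Int × List Int)} {X : List Int}
    (h : X ⊆ g.flatMap (fun p => p.2)) (i : Nat) :
    (pvGrow g)^[i] X ⊆ g.flatMap (fun p => p.2) := by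
  induction i with
  | zero => simpa
  | succ i ih => rw [Function.iterate_succ_apply']; exact grow_subset_univ ih

theorem exists_closed (g : List (Int × List Int)) (X0 : List Int)
    (hX0 : X0 ⊆ g.flatMap (fun p => p.2)) :
    ∃ i, (∀ x ∈ (pvGrow g)^[i] X0, pvNbrsD g x ⊆ (pvGrow g)^[i] X0) ∧
      (pvGrow g)^[i] X0 ⊆ (pvGrow g)^[(g.flatMap (fun p => p.2)).dedup.length + 1] X0 := by
  set N := (g.flatMap (fun p => p.2)).dedup.length + 1 with hN
  have hstep : ∃ i < N, (pvGrow g)^[i+1] X0 ⊆ (pvGrow g)^[i] X0 := by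
    by_contra hc
    push Not at hc
    have hcard : ∀ i, i ≤ N → i ≤ ((pvGrow g)^[i] X0).toFinset.card := by
      intro i
      induction i with
      | zero => omega
      | succ i ih =>
          intro hi
          have hci := hc i (by omega)
          rw [List.subset_def] at hci
          push Not at hci
          obtain ⟨y, hy1, hy2⟩ := hci
          have hsub : ((pvGrow g)^[i] X0).toFinset ⊆ ((pvGrow g)^[i+1] X0).toFinset := by
            intro a ha
            rw [List.mem_toFinset] at *
            exact iterate_subset_iterate g (by omega) X0 ha
          have hlt : ((pvGrow g)^[i] X0).toFinset.card < ((pvGrow g)^[i+1] X0).toFinset.card := by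
            apply Finset.card_lt_card
            rw [Finset.ssubset_iff_of_subset hsub]
            exact ⟨y, List.mem_toFinset.2 hy1, fun hmem => hy2 (List.mem_toFinset.1 hmem)⟩
          have := ih (by omega)
          omega
    have h1 : N ≤ ((pvGrow g)^[N] X0).toFinset.card := hcard N le_rfl
    have h2 : ((pvGrow g)^[N] X0).toFinset.card ≤ (g.flatMap (fun p => p.2)).toFinset.card := by
      apply Finset.card_le_card
      intro a ha
      rw [List.mem_toFinset] at *
      exact iterate_subset_univ hX0 N ha
    simp only [List.card_toFinset] at h1 h2
    omega
  obtain ⟨i, hiN, hsub⟩ := hstep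
  refine ⟨i, ?_, iterate_subset_iterate g (by omega) X0⟩
  intro x hx a ha
  apply hsub
  rw [Function.iterate_succ_apply']
  exact nbrs_subset_grow hx ha

theorem reach_in_closed {g : List (Int × List Int)} {q d : Int} {X : List Int}
    (h : Relation.ReflTransGen (EdgeG g) q d) (hq : q ∈ X)
    (hcl : ∀ x ∈ X, pvNbrsD g x ⊆ X) : d ∈ X := by
  induction h with
  | refl => exact hq
  | @tail b c hb e ih => exact hcl b ih e

theorem comp {g : List (Int × List Int)} {v d : Int}
    (h : Relation.ReflTransGen (EdgeG g) v d) : d = v ∨ d ∈ pvDesc g v := by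
  rcases h.cases_head with rfl | ⟨c, hc, hr⟩
  · exact Or.inl rfl
  · right
    have hX0 : pvNbrsD g v ⊆ g.flatMap (fun p => p.2) := fun a ha => mem_nbrs_mem_flat ha
    obtain ⟨i, hcl, hsub⟩ := exists_closed g (pvNbrsD g v) hX0
    have hc' : c ∈ (pvGrow g)^[i] (pvNbrsD g v) :=
      iterate_subset_iterate g (Nat.zero_le i) _ hc
    exact hsub (reach_in_closed hr hc' hcl)

theorem acy_of_pre {g : List (Int × List Int)} {s : Int} (hp : Pre_dfs g s) : AcyG g s := by
  intro u w hu he hr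
  by_contra hne
  have hu' : u ∈ s :: pvDesc g s := by
    rcases comp hu with rfl | h
    · exact List.mem_cons_self
    · exact List.mem_cons_of_mem _ h
  have := hp u hu' w he hne
  apply this
  rcases comp hr with rfl | h
  · exact List.mem_cons_self
  · exact List.mem_cons_of_mem _ h

theorem acy_mono {g : List (Int × List Int)} {s r : Int} (ha : AcyG g s)
    (h : Relation.ReflTransGen (EdgeG g) s r) : AcyG g r :=
  fun u w hu he hr => ha u w (h.trans hu) he hr

theorem mKset_finite (g : List (Int × List Int)) (s : Int) : (mKset g s).Finite :=
  Set.Finite.subset (List.finite_toSet (g.map Prod.fst)) (fun _ hv => hv.2)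

theorem mK_le (g : List (Int × List Int)) (s : Int) : mK g s ≤ g.length := by
  unfold mK
  have h1 : mKset g s ⊆ {v | v ∈ g.map Prod.fst} := fun v hv => hv.2
  have h2 : (mKset g s).ncard ≤ ({v | v ∈ g.map Prod.fst} : Set Int).ncard :=
    Set.ncard_le_ncard h1 (List.finite_toSet _)
  have h3 : ({v | v ∈ g.map Prod.fst} : Set Int) = ↑(g.map Prod.fst).toFinset := by
    ext v; simp
  rw [h3, Set.ncard_coe_finset, List.card_toFinset] at h2
  have h4 : (g.map Prod.fst).dedup.length ≤ (g.map Prod.fst).length :=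
    List.Sublist.length_le (List.dedup_sublist _)
  simpa using le_trans h2 (by simpa using h4)

theorem mK_lt {g : List (Int × List Int)} {s r : Int} (hk : s ∈ g.map Prod.fst)
    (he : EdgeG g s r) (hne : r ≠ s) (ha : AcyG g s) : mK g r < mK g s := by
  unfold mK
  apply Set.ncard_lt_ncard _ (mKset_finite g s)
  constructor
  · exact fun v hv => ⟨(Relation.ReflTransGen.single he).trans hv.1, hv.2⟩
  · intro hsub
    have hs : s ∈ mKset g s := ⟨Relation.ReflTransGen.refl, hk⟩
    have hs' : s ∈ mKset g r := hsub hs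
    exact hne (ha s r Relation.ReflTransGen.refl he hs'.1)

-- one loop step of A preserves the fold invariants
theorem Jstep (f : Nat) (g : List (Int × List Int)) (p r : Int) (rest D : List Int)
    (IHa : ∀ t, AcyG g t → mK g t ≤ f →
      ∀ d, d ∈ dfsA_F f g t ↔ Relation.ReflTransGen (EdgeG g) t d)
    (hpD : p ∈ D)
    (hJ1 : ∀ x ∈ D, Relation.ReflTransGen (EdgeG g) p x)
    (hJ2 : ∀ x ∈ D, x ≠ p → ∀ d, Relation.ReflTransGen (EdgeG g) x d → d ∈ D)
    (hJ3 : ∀ d, Relation.ReflTransGen (EdgeG g) p d →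
      d ∈ D ∨ ∃ q ∈ r :: rest, q ∉ D ∧ Relation.ReflTransGen (EdgeG g) q d)
    (hr : EdgeG g p r)
    (hacy : AcyG g p) (hkey : p ∈ g.map Prod.fst) (hm : mK g p ≤ f + 1) :
    p ∈ stepA f g D r ∧
    (∀ x ∈ stepA f g D r, Relation.ReflTransGen (EdgeG g) p x) ∧
    (∀ x ∈ stepA f g D r, x ≠ p → ∀ d, Relation.ReflTransGen (EdgeG g) x d → d ∈ stepA f g D r) ∧
    (∀ d, Relation.ReflTransGen (EdgeG g) p d →
      d ∈ stepA f g D r ∨ ∃ q ∈ rest, q ∉ stepA f g D r ∧ Relation.ReflTransGen (EdgeG g) q d) ∧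
    (∀ d, d ∈ stepA f g D r ↔ d ∈ D ∨ (r ∉ D ∧ Relation.ReflTransGen (EdgeG g) r d)) := by
  by_cases hrD : r ∈ D
  · have hstep : stepA f g D r = D := by simp [stepA, hrD]
    rw [hstep]
    refine ⟨hpD, hJ1, hJ2, ?_, ?_⟩
    · intro d hd
      rcases hJ3 d hd with h | ⟨q, hq, hqD, hqd⟩
      · exact Or.inl h
      · rcases List.mem_cons.1 hq with rfl | hq'
        · exact absurd hrD hqD
        · exact Or.inr ⟨q, hq', hqD, hqd⟩
    · intro d; simp [hrD]
  · have hrp : r ≠ p := fun h => hrD (h ▸ hpD)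
    have hacyr : AcyG g r := acy_mono hacy (Relation.ReflTransGen.single hr)
    have hmr : mK g r ≤ f := by have := mK_lt hkey hr hrp hacy; omega
    have hmem : ∀ d, d ∈ dfsA_F f g r ↔ Relation.ReflTransGen (EdgeG g) r d := IHa r hacyr hmr
    have hstep : stepA f g D r = D ++ (dfsA_F f g r).filter (fun d => d ∉ D) := by
      simp [stepA, hrD]
    have hmem' : ∀ d, d ∈ stepA f g D r ↔ d ∈ D ∨ (r ∉ D ∧ Relation.ReflTransGen (EdgeG g) r d) := by
      intro d
      rw [hstep]
      simp only [List.mem_append, List.mem_filter, decide_eq_true_eq, hmem d]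
      constructor
      · rintro (h | ⟨h1, h2⟩)
        · exact Or.inl h
        · exact Or.inr ⟨hrD, h1⟩
      · rintro (h | ⟨_, h⟩)
        · exact Or.inl h
        · by_cases hd : d ∈ D
          · exact Or.inl hd
          · exact Or.inr ⟨h, hd⟩
    refine ⟨(hmem' p).2 (Or.inl hpD), ?_, ?_, ?_, hmem'⟩
    · intro x hx
      rcases (hmem' x).1 hx with h | ⟨_, h⟩
      · exact hJ1 x h
      · exact (Relation.ReflTransGen.single hr).trans h
    · intro x hx hxp d hd
      rcases (hmem' x).1 hx with h | ⟨_, h⟩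
      · exact (hmem' d).2 (Or.inl (hJ2 x h hxp d hd))
      · exact (hmem' d).2 (Or.inr ⟨hrD, h.trans hd⟩)
    · intro d hd
      rcases hJ3 d hd with h | ⟨q, hq, hqD, hqd⟩
      · exact Or.inl ((hmem' d).2 (Or.inl h))
      · rcases List.mem_cons.1 hq with rfl | hq'
        · exact Or.inl ((hmem' d).2 (Or.inr ⟨hrD, hqd⟩))
        · by_cases hq'' : q ∈ stepA f g D r
          · rcases (hmem' q).1 hq'' with h | ⟨_, h⟩
            · exact absurd h hqD
            · exact Or.inl ((hmem' d).2 (Or.inr ⟨hrD, h.trans hqd⟩))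
          · exact Or.inr ⟨q, hq', hq'', hqd⟩

theorem AmemFold (f : Nat) (g : List (Int × List Int)) (p : Int)
    (IHa : ∀ t, AcyG g t → mK g t ≤ f →
      ∀ d, d ∈ dfsA_F f g t ↔ Relation.ReflTransGen (EdgeG g) t d) :
    ∀ (rs D : List Int), p ∈ D →
    (∀ x ∈ D, Relation.ReflTransGen (EdgeG g) p x) →
    (∀ x ∈ D, x ≠ p → ∀ d, Relation.ReflTransGen (EdgeG g) x d → d ∈ D) →
    (∀ d, Relation.ReflTransGen (EdgeG g) p d →
      d ∈ D ∨ ∃ q ∈ rs, q ∉ D ∧ Relation.ReflTransGen (EdgeG g) q d) →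
    (∀ r ∈ rs, EdgeG g p r) →
    AcyG g p → p ∈ g.map Prod.fst → mK g p ≤ f + 1 →
    (∀ x ∈ rs.foldl (stepA f g) D, Relation.ReflTransGen (EdgeG g) p x) ∧
    (∀ d, Relation.ReflTransGen (EdgeG g) p d → d ∈ rs.foldl (stepA f g) D) := by
  intro rs
  induction rs with
  | nil =>
      intro D _ hJ1 _ hJ3 _ _ _ _
      refine ⟨hJ1, fun d hd => ?_⟩
      rcases hJ3 d hd with h | ⟨q, hq, _⟩
      · exact h
      · exact absurd hq (List.not_mem_nil)
  | cons r rest ih =>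
      intro D hpD hJ1 hJ2 hJ3 hrs hacy hkey hm
      obtain ⟨hp', hJ1', hJ2', hJ3', _⟩ :=
        Jstep f g p r rest D IHa hpD hJ1 hJ2 hJ3 (hrs r List.mem_cons_self) hacy hkey hm
      exact ih (stepA f g D r) hp' hJ1' hJ2' hJ3'
        (fun q hq => hrs q (List.mem_cons_of_mem _ hq)) hacy hkey hm

theorem Amem (f : Nat) : ∀ (g : List (Int × List Int)) (s : Int), AcyG g s → mK g s ≤ f →
    ∀ d, d ∈ dfsA_F f g s ↔ Relation.ReflTransGen (EdgeG g) s d := by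
  induction f with
  | zero =>
      intro g s hacy hm d
      have hkey : s ∉ g.map Prod.fst := by
        intro hk
        have : s ∈ mKset g s := ⟨Relation.ReflTransGen.refl, hk⟩
        have hpos : 0 < mK g s := (Set.ncard_pos (mKset_finite g s)).2 ⟨s, this⟩
        omega
      have hnil : pvNbrsD g s = [] := by
        rw [pvNbrsD_eq, (pvLookup_eq_none_iff g s).2 hkey]
        rfl
      simp only [dfsA_F, List.mem_singleton]
      constructor
      · rintro rfl; exact Relation.ReflTransGen.refl
      · intro h
        rcases headDecomp h with rfl | ⟨q, hq, _, _⟩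
        · rfl
        · simp only [EdgeG, hnil] at hq; exact absurd hq (List.not_mem_nil)
  | succ f ihf =>
      intro g s hacy hm d
      cases hl : pvLookup g s with
      | none =>
          have hkey : s ∉ g.map Prod.fst := (pvLookup_eq_none_iff g s).1 hl
          have hnil : pvNbrsD g s = [] := by rw [pvNbrsD_eq, hl]; rfl
          rw [dfsA_F_succ, hl]
          simp only [List.mem_singleton]
          constructor
          · rintro rfl; exact Relation.ReflTransGen.refl
          · intro h
            rcases headDecomp h with rfl | ⟨q, hq, _, _⟩
            · rfl
            · simp only [EdgeG, hnil] at hq; exact absurd hq (List.not_mem_nil)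
      | some ns =>
          have hkey : s ∈ g.map Prod.fst := by
            by_contra h
            rw [← pvLookup_eq_none_iff] at h
            rw [h] at hl; cases hl
          have hns : pvNbrsD g s = ns := by rw [pvNbrsD_eq, hl]; rfl
          rw [dfsA_F_succ, hl]
          have hIHa : ∀ t, AcyG g t → mK g t ≤ f →
              ∀ d, d ∈ dfsA_F f g t ↔ Relation.ReflTransGen (EdgeG g) t d :=
            fun t ha hm' => ihf g t ha hm'
          have hfold := AmemFold f g s hIHa ns.reverse [s] List.mem_cons_self
            (by intro x hx; rw [List.mem_singleton] at hx; subst hx; exact Relation.ReflTransGen.refl)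
            (by intro x hx hxs; rw [List.mem_singleton] at hx; exact absurd hx hxs)
            (by
              intro d hd
              rcases headDecomp hd with rfl | ⟨q, hq, hqs, hqd⟩
              · exact Or.inl List.mem_cons_self
              · simp only [EdgeG, hns] at hq
                exact Or.inr ⟨q, List.mem_reverse.2 hq, by simpa using hqs, hqd⟩)
            (by intro r hrr; rw [List.mem_reverse] at hrr; simp only [EdgeG, hns]; exact hrr)
            hacy hkey hm
          exact ⟨fun hd => hfold.1 d hd, fun hd => hfold.2 d hd⟩

theorem mem_seenD {S D : List Int} {d : Int} :
    d ∈ S ++ D.filter (fun x => x ∉ S) ↔ d ∈ S ∨ d ∈ D := by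
  simp only [List.mem_append, List.mem_filter, decide_eq_true_eq]
  constructor
  · rintro (h | ⟨h, _⟩)
    · exact Or.inl h
    · exact Or.inr h
  · rintro (h | h)
    · exact Or.inl h
    · by_cases hs : d ∈ S
      · exact Or.inl hs
      · exact Or.inr ⟨h, hs⟩

-- the stack machine, run across one neighbour list, performs A's fold
theorem MFold (f : Nat) (g : List (Int × List Int)) (p : Int)
    (IHmain : ∀ (t : Int) (S st : List Int), t ∉ S → AcyG g t → mK g t ≤ f →
      (∀ v ∈ S, Relation.ReflTransGen (EdgeG g) t v →
        ∀ d, Relation.ReflTransGen (EdgeG g) v d → d ∈ S) →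
      runS g S (t :: st) = runS g (S ++ (dfsA_F f g t).filter (fun d => d ∉ S)) st) :
    ∀ (rs D S st : List Int), p ∈ D →
    (∀ x ∈ D, Relation.ReflTransGen (EdgeG g) p x) →
    (∀ x ∈ D, x ≠ p → ∀ d, Relation.ReflTransGen (EdgeG g) x d → d ∈ D) →
    (∀ d, Relation.ReflTransGen (EdgeG g) p d →
      d ∈ D ∨ ∃ q ∈ rs, q ∉ D ∧ Relation.ReflTransGen (EdgeG g) q d) →
    (∀ r ∈ rs, EdgeG g p r) →
    AcyG g p → p ∈ g.map Prod.fst → mK g p ≤ f + 1 →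
    (∀ v ∈ S, Relation.ReflTransGen (EdgeG g) p v →
      ∀ d, Relation.ReflTransGen (EdgeG g) v d → d ∈ S) →
    runS g (S ++ D.filter (fun d => d ∉ S)) (rs ++ st) =
      runS g (S ++ (rs.foldl (stepA f g) D).filter (fun d => d ∉ S)) st := by
  intro rs
  induction rs with
  | nil => intro D S st _ _ _ _ _ _ _ _ _; rfl
  | cons r rest ih =>
      intro D S st hpD hJ1 hJ2 hJ3 hrs hacy hkey hm hS
      have hrE : EdgeG g p r := hrs r List.mem_cons_self
      have hIHa : ∀ t, AcyG g t → mK g t ≤ f →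
          ∀ d, d ∈ dfsA_F f g t ↔ Relation.ReflTransGen (EdgeG g) t d :=
        fun t ha hm' => Amem f g t ha hm'
      obtain ⟨hp', hJ1', hJ2', hJ3', hmem'⟩ :=
        Jstep f g p r rest D hIHa hpD hJ1 hJ2 hJ3 hrE hacy hkey hm
      have hkeyeq : S ++ (stepA f g D r).filter (fun d => d ∉ S) =
          (if r ∈ S ++ D.filter (fun d => d ∉ S) then S ++ D.filter (fun d => d ∉ S)
           else (S ++ D.filter (fun d => d ∉ S)) ++
             (dfsA_F f g r).filter (fun d => d ∉ S ++ D.filter (fun x => x ∉ S))) := by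
        by_cases hrD : r ∈ D
        · have h1 : stepA f g D r = D := by simp [stepA, hrD]
          rw [h1, if_pos (mem_seenD.2 (Or.inr hrD))]
        · have hrp : r ≠ p := fun h => hrD (h ▸ hpD)
          have hacyr : AcyG g r := acy_mono hacy (Relation.ReflTransGen.single hrE)
          have hmr : mK g r ≤ f := by have := mK_lt hkey hrE hrp hacy; omega
          have hAr : ∀ d, d ∈ dfsA_F f g r ↔ Relation.ReflTransGen (EdgeG g) r d :=
            hIHa r hacyr hmr
          have h1 : stepA f g D r = D ++ (dfsA_F f g r).filter (fun d => d ∉ D) := by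
            simp [stepA, hrD]
          by_cases hrS : r ∈ S
          · rw [if_pos (mem_seenD.2 (Or.inl hrS))]
            rw [h1, List.filter_append]
            have h4 : ((dfsA_F f g r).filter (fun d => d ∉ D)).filter (fun d => d ∉ S) = [] := by
              rw [List.filter_eq_nil_iff]
              intro a ha
              have ha' : a ∈ dfsA_F f g r := List.mem_of_mem_filter ha
              have : a ∈ S := hS r hrS (Relation.ReflTransGen.single hrE) a ((hAr a).1 ha')
              simp [this]
            rw [h4, List.append_nil]
          · have hracc : r ∉ S ++ D.filter (fun x => x ∉ S) := by
              rw [mem_seenD]; rintro (h | h); exact hrS h; exact hrD h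
            rw [if_neg hracc]
            rw [h1, List.filter_append, List.append_assoc]
            congr 1
            rw [List.filter_filter]
            congr 1
            apply List.filter_congr
            intro x _
            by_cases hxS : x ∈ S <;> by_cases hxD : x ∈ D <;>
              simp [mem_seenD, hxS, hxD]
      by_cases hracc : r ∈ S ++ D.filter (fun d => d ∉ S)
      · -- r already recorded: the machine just pops it
        have hstep : runS g (S ++ D.filter (fun d => d ∉ S)) ((r :: rest) ++ st) =
            runS g (S ++ D.filter (fun d => d ∉ S)) (rest ++ st) := by
          rw [List.cons_append, runS_cons, if_pos hracc]
        rw [hstep]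
        have hkeyeq' : S ++ D.filter (fun d => d ∉ S) =
            S ++ (stepA f g D r).filter (fun d => d ∉ S) := by
          rw [hkeyeq, if_pos hracc]
        rw [hkeyeq']
        exact ih (stepA f g D r) S st hp' hJ1' hJ2' hJ3'
          (fun q hq => hrs q (List.mem_cons_of_mem _ hq)) hacy hkey hm hS
      · -- r unseen: the machine explores it; by IHmain that equals A's recursive call
        have hrS : r ∉ S := fun h => hracc (List.mem_append_left _ h)
        have hrD : r ∉ D := fun h => hracc (mem_seenD.2 (Or.inr h))
        have hrp : r ≠ p := fun h => hrD (h ▸ hpD)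
        have hacyr : AcyG g r := acy_mono hacy (Relation.ReflTransGen.single hrE)
        have hmr : mK g r ≤ f := by have := mK_lt hkey hrE hrp hacy; omega
        have hSr : ∀ v ∈ S ++ D.filter (fun x => x ∉ S),
            Relation.ReflTransGen (EdgeG g) r v →
            ∀ d, Relation.ReflTransGen (EdgeG g) v d → d ∈ S ++ D.filter (fun x => x ∉ S) := by
          intro v hv hrv d hvd
          rcases mem_seenD.1 hv with hvS | hvD
          · have : Relation.ReflTransGen (EdgeG g) p v :=
              (Relation.ReflTransGen.single hrE).trans hrv
            exact mem_seenD.2 (Or.inl (hS v hvS this d hvd))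
          · by_cases hvp : v = p
            · subst hvp
              exact absurd (hacy v r Relation.ReflTransGen.refl hrE hrv) hrp
            · exact mem_seenD.2 (Or.inr (hJ2 v hvD hvp d hvd))
        have hstep : runS g (S ++ D.filter (fun d => d ∉ S)) ((r :: rest) ++ st) =
            runS g ((S ++ D.filter (fun d => d ∉ S)) ++
              (dfsA_F f g r).filter (fun d => d ∉ S ++ D.filter (fun x => x ∉ S)))
              (rest ++ st) := by
          rw [List.cons_append]
          exact IHmain r (S ++ D.filter (fun d => d ∉ S)) (rest ++ st) hracc hacyr hmr hSr
        rw [hstep]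
        have hkeyeq' : (S ++ D.filter (fun d => d ∉ S)) ++
            (dfsA_F f g r).filter (fun d => d ∉ S ++ D.filter (fun x => x ∉ S)) =
            S ++ (stepA f g D r).filter (fun d => d ∉ S) := by
          rw [hkeyeq, if_neg hracc]
        rw [hkeyeq']
        exact ih (stepA f g D r) S st hp' hJ1' hJ2' hJ3'
          (fun q hq => hrs q (List.mem_cons_of_mem _ hq)) hacy hkey hm hS

-- the stack machine explores one node exactly as A's recursive call does
theorem MainS (f : Nat) : ∀ (g : List (Int × List Int)) (s : Int) (S st : List Int),
    s ∉ S → AcyG g s → mK g s ≤ f →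
    (∀ v ∈ S, Relation.ReflTransGen (EdgeG g) s v →
      ∀ d, Relation.ReflTransGen (EdgeG g) v d → d ∈ S) →
    runS g S (s :: st) = runS g (S ++ (dfsA_F f g s).filter (fun d => d ∉ S)) st := by
  induction f with
  | zero =>
      intro g s S st hs hacy hm _
      have hkey : s ∉ g.map Prod.fst := by
        intro hk
        have : s ∈ mKset g s := ⟨Relation.ReflTransGen.refl, hk⟩
        have hpos : 0 < mK g s := (Set.ncard_pos (mKset_finite g s)).2 ⟨s, this⟩
        omega
      have hl : pvLookup g s = none := (pvLookup_eq_none_iff g s).2 hkey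
      rw [runS_cons, if_neg hs, hl]
      simp only [dfsA_F, List.filter_cons, List.filter_nil, hs, decide_false,
        not_false_eq_true, decide_not, List.nil_append]
      rfl
  | succ f ihf =>
      intro g s S st hs hacy hm hS
      cases hl : pvLookup g s with
      | none =>
          rw [runS_cons, if_neg hs, hl, dfsA_F_succ, hl]
          simp only [List.filter_cons, List.filter_nil, hs, decide_false,
            not_false_eq_true, decide_not, List.nil_append]
          rfl
      | some ns =>
          have hkey : s ∈ g.map Prod.fst := by
            by_contra h
            rw [← pvLookup_eq_none_iff] at h
            rw [h] at hl; cases hl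
          have hns : pvNbrsD g s = ns := by rw [pvNbrsD_eq, hl]; rfl
          rw [runS_cons, if_neg hs, hl, dfsA_F_succ, hl]
          have hinit : S ++ [s] = S ++ [s].filter (fun d => d ∉ S) := by
            simp [hs]
          rw [hinit]
          exact MFold f g s (fun t S' st' ht ha hm' hS' => ihf g t S' st' ht ha hm' hS')
            ns.reverse [s] S st List.mem_cons_self
            (by intro x hx; rw [List.mem_singleton] at hx; subst hx; exact Relation.ReflTransGen.refl)
            (by intro x hx hxs; rw [List.mem_singleton] at hx; exact absurd hx hxs)
            (by
              intro d hd
              rcases headDecomp hd with rfl | ⟨q, hq, hqs, hqd⟩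
              · exact Or.inl List.mem_cons_self
              · simp only [EdgeG, hns] at hq
                exact Or.inr ⟨q, List.mem_reverse.2 hq, by simpa using hqs, hqd⟩)
            (by intro r hrr; rw [List.mem_reverse] at hrr; simp only [EdgeG, hns]; exact hrr)
            hacy hkey hm hS

-- ===== VERDICT =====
theorem dfs_spec : Claim_equal_dfs := by
  intro g s _ hpre
  unfold Spec_dfs dfs dfs_alt
  have hacy := acy_of_pre hpre
  have hm : mK g s ≤ g.length + 1 := le_trans (mK_le g s) (by omega)
  have hmain := MainS (g.length + 1) g s [] [] (List.not_mem_nil) hacy hm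
    (by intro v hv; exact absurd hv (List.not_mem_nil))
  rw [hmain, runS_nil]
  simp
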